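-- pv_equiv track=rewrite | github.com/jjbeto/adventofcode | utils.py | get_diagonals_from_text
-- ===== SOURCE A (Python) =====
-- def get_diagonals_from_text(text: str, sep=None):
--     """
--     returns all "right-down" diagonal lines from test
--
--     example:
--     text   = 12345
--              67890
--     result = [6, 17, 28, 39, 40, 5]
--     """
--     lines = text.splitlines()
--     if sep:
--         col_num = len(lines[0].split(sep))
--     else:
--         col_num = len(lines[0])
--     row_num = len(lines)
--
--     coords = [
--                  [row * col_num + row + col for row in range(min(row_num, col_num - col))]
--                  for col in range(col_num - 1)
--              ] + [
--                  [(row + col) * col_num + col for col in range(min(row_num - row, col_num))]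
--                  for row in range(1, row_num - 1)
--              ]
--
--     letter_array = []
--     for line in lines:
--         if sep:
--             letter_array += line.split(sep)
--         else:
--             letter_array += list(line)
--     return ["".join(map(lambda i: letter_array[i], positions)) for positions in coords]
-- ===== SOURCE B (Python) =====
-- def get_diagonals_from_text(text: str, sep=None):
--     """Right-down diagonals, found by walking the 2D grid with bounds checks."""
--     lines = text.splitlines()
--     if sep:
--         grid = [line.split(sep) for line in lines]
--     else:
--         grid = [list(line) for line in lines]
--     col_num = len(grid[0])
--     row_num = len(lines)
--
--     def walk(r, c):
--         cells = []
--         while r < row_num and c < col_num: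
--             cells.append(grid[r][c])
--             r += 1
--             c += 1
--         return "".join(cells)
--
--     return [walk(0, c) for c in range(col_num - 1)] + \
--            [walk(r, 0) for r in range(1, row_num - 1)]
-- ===== Notes on version B (the rewrite author's own statement) =====
-- stated objective: simpler
-- what changed: B keeps the split lines as a 2D grid and walks each right-down diagonal directly with bounds checks, instead of A's precomputation of flat-index position lists into a flattened one-dimensional cell array.
-- outside the precondition, e.g. on get_diagonals_from_text('ab\nabc\nab', None): A returns ['ab', 'aa'], B returns ['ab', 'ab']; on get_diagonals_from_text('ab\na\nabc', None): A returns ['aa', 'ac'], B raises IndexError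
import Mathlib
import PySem

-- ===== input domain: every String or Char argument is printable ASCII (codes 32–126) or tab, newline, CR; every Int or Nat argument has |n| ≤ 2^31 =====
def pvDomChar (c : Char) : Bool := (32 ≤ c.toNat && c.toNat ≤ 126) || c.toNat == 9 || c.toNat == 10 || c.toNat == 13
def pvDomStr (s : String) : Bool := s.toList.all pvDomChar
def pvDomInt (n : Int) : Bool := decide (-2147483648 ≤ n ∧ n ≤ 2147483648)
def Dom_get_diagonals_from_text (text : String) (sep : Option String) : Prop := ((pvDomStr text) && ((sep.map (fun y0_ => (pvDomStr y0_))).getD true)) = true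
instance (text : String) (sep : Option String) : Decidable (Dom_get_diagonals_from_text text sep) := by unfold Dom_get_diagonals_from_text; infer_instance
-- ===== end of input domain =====

-- B replaces A's precomputed flat-index lists into a flattened cell array by a direct
-- bounds-checked walk over the 2D grid (objective: simpler; same diagonal order and ranges as A).

-- ===== PORT A =====
-- literal transliteration of A (indices are nonnegative throughout; out-of-range access,
-- excluded by Pre_, is Python's IndexError — realised here as the dummy default "")
def get_diagonals_from_text (text : String) (sep : Option String) : List String :=
  let lines := PySem.Str.splitlines text
  let sepT : Bool := match sep with | some s => s != "" | none => false   -- Python truthiness of `sep`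
  let col_num : Nat :=
    if sepT then ((PySem.Str.split? (lines.getD 0 "") (sep.getD "")).getD []).length
    else (lines.getD 0 "").toList.length
  let row_num : Nat := lines.length
  let coords : List (List Nat) :=
    (List.range (col_num - 1)).map (fun col =>
      (List.range (min row_num (col_num - col))).map (fun row => row * col_num + row + col))
    ++ (List.range' 1 (row_num - 1 - 1)).map (fun row =>
      (List.range (min (row_num - row) col_num)).map (fun col => (row + col) * col_num + col))
  let letter_array : List String :=
    lines.foldl (fun acc line =>
      if sepT then acc ++ (PySem.Str.split? line (sep.getD "")).getD []
      else acc ++ line.toList.map (fun ch => String.ofList [ch])) []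
  coords.map (fun positions => PySem.Str.join "" (positions.map (fun i => letter_array.getD i "")))

-- ===== PORT B =====
-- walk one right-down diagonal from (r, c), collecting cells while inside the grid
def pvWalk (grid : List (List String)) (row_num col_num r c : Nat) : List String :=
  if h : r < row_num ∧ c < col_num then
    (grid.getD r []).getD c "" :: pvWalk grid row_num col_num (r + 1) (c + 1)
  else []
termination_by row_num - r
decreasing_by omega

def get_diagonals_from_text_alt (text : String) (sep : Option String) : List String :=
  let lines := PySem.Str.splitlines text
  let grid : List (List String) :=
    match sep with
    | some s => if s != "" then lines.map (fun ln : String => (PySem.Str.split? ln s).getD [])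
                else lines.map (fun ln : String => ln.toList.map (fun ch => String.ofList [ch]))
    | none => lines.map (fun ln : String => ln.toList.map (fun ch => String.ofList [ch]))
  let col_num : Nat := (grid.getD 0 []).length
  let row_num : Nat := lines.length
  (List.range (col_num - 1)).map (fun c => PySem.Str.join "" (pvWalk grid row_num col_num 0 c))
  ++ (List.range' 1 (row_num - 1 - 1)).map (fun r => PySem.Str.join "" (pvWalk grid row_num col_num r 0))

-- ===== PRECONDITION & SPEC =====
-- how one line is split into cells (Python: line.split(sep) if sep else list(line))
def pvCells (sep : Option String) (ln : String) : List String :=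
  match sep with
  | some s => if s != "" then (PySem.Str.split? ln s).getD [] else ln.toList.map (fun ch => String.ofList [ch])
  | none => ln.toList.map (fun ch => String.ofList [ch])

-- Pre_ excludes empty text, on which A raises IndexError at lines[0], and ragged grids
-- (some line splits into a different number of cells than the first), on which A's
-- fixed-width flat-index arithmetic either raises IndexError or accidentally reads cells
-- belonging to the wrong row.
def Pre_get_diagonals_from_text (text : String) (sep : Option String) : Prop :=
  PySem.Str.splitlines text ≠ [] ∧
  ∀ ln ∈ PySem.Str.splitlines text,
    (pvCells sep ln).length = (pvCells sep ((PySem.Str.splitlines text).getD 0 "")).length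
instance (text : String) (sep : Option String) : Decidable (Pre_get_diagonals_from_text text sep) := by
  unfold Pre_get_diagonals_from_text; infer_instance

def pvWitness_get_diagonals_from_text : String × Option String := ("12345\n67890\nabcde", none)

def Spec_get_diagonals_from_text (text : String) (sep : Option String) (out : List String) : Prop := out = get_diagonals_from_text_alt text sep
instance (text : String) (sep : Option String) (out : List String) : Decidable (Spec_get_diagonals_from_text text sep out) := by unfold Spec_get_diagonals_from_text; infer_instance

-- ===== CLAIM (what is proved, stated in full; the proofs are below) =====
def Claim_equal_get_diagonals_from_text : Prop := ∀ (text : String) (sep : Option String), Dom_get_diagonals_from_text text sep → Pre_get_diagonals_from_text text sep → Spec_get_diagonals_from_text text sep (get_diagonals_from_text text sep)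

-- ===== LEMMAS AND PROOFS =====

-- A's letter_array loop is concatenation of the per-line cell lists
theorem pv_foldl_flatten (g : String → List String) :
    ∀ (ls : List String) (acc : List String),
      ls.foldl (fun a ln => a ++ g ln) acc = acc ++ (ls.map g).flatten := by
  intro ls
  induction ls with
  | nil => intro acc; simp
  | cons hd tl ih => intro acc; simp [ih, List.append_assoc]

-- indexing the flattened rectangular grid at r*w+c is indexing row r at column c
theorem pv_flatten_getD (w : Nat) :
    ∀ (grid : List (List String)) (r c : Nat),
      (∀ row ∈ grid, row.length = w) → r < grid.length → c < w →
      (grid.flatten).getD (r * w + c) "" = (grid.getD r []).getD c "" := by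
  intro grid
  induction grid with
  | nil => intro r c _ hr _; simp at hr
  | cons hd tl ih =>
    intro r c hrect hr hc
    have hhd : hd.length = w := hrect hd (by simp)
    cases r with
    | zero =>
      have hcl : c < hd.length := by omega
      simp [List.getD, List.getElem?_append_left hcl]
    | succ r =>
      have hlen : hd.length ≤ (r + 1) * w + c := by nlinarith [hhd]
      have : (r + 1) * w + c - hd.length = r * w + c := by
        rw [hhd]; ring_nf; omega
      rw [List.flatten_cons, List.getD_append_right _ _ _ _ hlen, this]
      simp only [List.getD_cons_succ]
      exact ih r c (fun row hrow => hrect row (by simp [hrow])) (by simpa using hr) hc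

-- the walk from (r,c) visits exactly rows r+i, columns c+i, for i < min (n-r) (w-c)
theorem pv_walk_eq (grid : List (List String)) (n w : Nat) :
    ∀ r c, pvWalk grid n w r c =
      (List.range (min (n - r) (w - c))).map (fun i => (grid.getD (r + i) []).getD (c + i) "") := by
  intro r c
  fun_induction pvWalk grid n w r c with
  | case1 r c h ih =>
    have hm : min (n - r) (w - c) = min (n - (r + 1)) (w - (c + 1)) + 1 := by omega
    rw [hm, List.range_succ_eq_map, List.map_cons, List.map_map, ih]
    refine congrArg₂ List.cons (by simp) (List.map_congr_left fun i _ => ?_)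
    simp only [Function.comp, Nat.succ_eq_add_one]
    have h1 : r + 1 + i = r + (i + 1) := by omega
    have h2 : c + 1 + i = c + (i + 1) := by omega
    rw [h1, h2]
  | case2 r c h =>
    have hm : min (n - r) (w - c) = 0 := by omega
    simp [hm]

-- the shared core: A's flat-index diagonals equal B's walked diagonals on a rectangular grid
theorem pv_core (lines : List String) (g : String → List String) (w : Nat)
    (hw : w = (g (lines.getD 0 "")).length)
    (hne : lines ≠ [])
    (hrect : ∀ ln ∈ lines, (g ln).length = w) :
    ((List.range (w - 1)).map (fun col =>
        PySem.Str.join "" ((List.range (min lines.length (w - col))).map (fun row =>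
          ((lines.map g).flatten).getD (row * w + row + col) "")))
     ++ (List.range' 1 (lines.length - 1 - 1)).map (fun row =>
        PySem.Str.join "" ((List.range (min (lines.length - row) w)).map (fun col =>
          ((lines.map g).flatten).getD ((row + col) * w + col) ""))))
    =
    ((List.range ((((lines.map g).getD 0 []).length) - 1)).map (fun c =>
        PySem.Str.join "" (pvWalk (lines.map g) lines.length (((lines.map g).getD 0 []).length) 0 c))
     ++ (List.range' 1 (lines.length - 1 - 1)).map (fun r =>
        PySem.Str.join "" (pvWalk (lines.map g) lines.length (((lines.map g).getD 0 []).length) r 0))) := by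
  have hg0 : ((lines.map g).getD 0 []) = g (lines.getD 0 "") := by
    cases lines with
    | nil => exact absurd rfl hne
    | cons hd tl => simp [List.getD]
  rw [hg0, ← hw]
  have hrect' : ∀ row ∈ lines.map g, row.length = w := by
    intro row hrow
    obtain ⟨ln, hln, rfl⟩ := List.mem_map.1 hrow
    exact hrect ln hln
  have hglen : (lines.map g).length = lines.length := by simp
  congr 1
  · apply List.map_congr_left
    intro col hcol
    have hcolw : col < w - 1 := List.mem_range.1 hcol
    congr 1
    rw [pv_walk_eq]
    simp only [Nat.sub_zero, zero_add]
    apply List.map_congr_left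
    intro row hrow
    have hrown : row < min lines.length (w - col) := List.mem_range.1 hrow
    have h1 : row * w + row + col = row * w + (col + row) := by omega
    rw [h1, pv_flatten_getD w _ row (col + row) hrect' (by omega) (by omega)]
  · apply List.map_congr_left
    intro row hrow
    have hrowb : 1 ≤ row ∧ row < lines.length - 1 := by
      have := List.mem_range'.1 hrow
      omega
    congr 1
    rw [pv_walk_eq]
    simp only [Nat.sub_zero]
    apply List.map_congr_left
    intro col hcol
    have hcoln : col < min (lines.length - row) w := List.mem_range.1 hcol
    rw [pv_flatten_getD w _ (row + col) col hrect' (by omega) (by omega)]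
    simp

-- ===== VERDICT (by name: the statement is the Claim_ definition above) =====
set_option maxHeartbeats 1000000 in
theorem get_diagonals_from_text_spec : Claim_equal_get_diagonals_from_text := by
  intro text sep _ hpre
  obtain ⟨hne, hrect⟩ := hpre
  unfold Spec_get_diagonals_from_text
  unfold get_diagonals_from_text get_diagonals_from_text_alt
  cases sep with
  | none =>
    simp only [pvCells] at hrect
    have hrect2 : ∀ ln ∈ PySem.Str.splitlines text,
        ((fun ln : String => ln.toList.map (fun ch => String.ofList [ch])) ln).length =
          ((PySem.Str.splitlines text).getD 0 "").toList.length := by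
      intro ln hln; simpa using hrect ln hln
    simp only [Bool.false_eq_true, if_false]
    rw [pv_foldl_flatten (fun ln : String => ln.toList.map (fun ch => String.ofList [ch]))]
    simp only [List.map_append, List.map_map, Function.comp_def, List.nil_append]
    exact pv_core (PySem.Str.splitlines text)
      (fun ln : String => ln.toList.map (fun ch => String.ofList [ch]))
      (((PySem.Str.splitlines text).getD 0 "").toList.length) (by simp) hne hrect2
  | some s =>
    by_cases hs : s = ""
    · subst hs
      simp only [pvCells, bne_self_eq_false, Bool.false_eq_true, if_false] at hrect ⊢
      have hrect2 : ∀ ln ∈ PySem.Str.splitlines text,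
          ((fun ln : String => ln.toList.map (fun ch => String.ofList [ch])) ln).length =
            ((PySem.Str.splitlines text).getD 0 "").toList.length := by
        intro ln hln; simpa using hrect ln hln
      rw [pv_foldl_flatten (fun ln : String => ln.toList.map (fun ch => String.ofList [ch]))]
      simp only [List.map_append, List.map_map, Function.comp_def, List.nil_append]
      exact pv_core (PySem.Str.splitlines text)
        (fun ln : String => ln.toList.map (fun ch => String.ofList [ch]))
        (((PySem.Str.splitlines text).getD 0 "").toList.length) (by simp) hne hrect2
    · have hbs : (s != "") = true := by simp [bne, hs]
      simp only [pvCells, hbs, if_true] at hrect ⊢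
      simp only [Option.getD_some]
      rw [pv_foldl_flatten (fun ln : String => (PySem.Str.split? ln s).getD [])]
      simp only [List.map_append, List.map_map, Function.comp_def, List.nil_append]
      exact pv_core (PySem.Str.splitlines text)
        (fun ln : String => (PySem.Str.split? ln s).getD [])
        (((PySem.Str.split? ((PySem.Str.splitlines text).getD 0 "") s).getD []).length) rfl hne hrect
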